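-- pv_equiv track=rewrite | github.com/uukuu/CVPR | 2-1/experiment.py | generate_test_image
-- ===== SOURCE A (Python) =====
-- from typing import List, Tuple
--
-- Pixel = Tuple[int, int, int]
--
-- def create_image(width: int, height: int, color: Pixel = (255, 255, 255)) -> List[List[Pixel]]:
--     return [[color for _ in range(width)] for _ in range(height)]
--
-- def draw_rectangle(pixels: List[List[Pixel]], top_left: Tuple[int, int], bottom_right: Tuple[int, int], color: Pixel) -> None:
--     x0, y0 = top_left
--     x1, y1 = bottom_right
--     for y in range(max(0, y0), min(len(pixels), y1)):
--         for x in range(max(0, x0), min(len(pixels[0]), x1)):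
--             pixels[y][x] = color
--
-- def draw_circle(pixels: List[List[Pixel]], center: Tuple[int, int], radius: int, color: Pixel) -> None:
--     cx, cy = center
--     for y in range(len(pixels)):
--         for x in range(len(pixels[0])):
--             if (x - cx) ** 2 + (y - cy) ** 2 <= radius ** 2:
--                 pixels[y][x] = color
--
-- def draw_triangle(pixels: List[List[Pixel]], p1: Tuple[int, int], p2: Tuple[int, int], p3: Tuple[int, int], color: Pixel) -> None:
--     # Barycentric fill
--     def edge(a, b, c):
--         return (c[0] - a[0]) * (b[1] - a[1]) - (c[1] - a[1]) * (b[0] - a[0])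
--
--     min_x = max(0, min(p1[0], p2[0], p3[0]))
--     max_x = min(len(pixels[0]) - 1, max(p1[0], p2[0], p3[0]))
--     min_y = max(0, min(p1[1], p2[1], p3[1]))
--     max_y = min(len(pixels) - 1, max(p1[1], p2[1], p3[1]))
--     area = edge(p1, p2, p3)
--     if area == 0:
--         return
--     for y in range(min_y, max_y + 1):
--         for x in range(min_x, max_x + 1):
--             p = (x, y)
--             w1 = edge(p2, p3, p)
--             w2 = edge(p3, p1, p)
--             w3 = edge(p1, p2, p)
--             if (w1 >= 0 and w2 >= 0 and w3 >= 0) or (w1 <= 0 and w2 <= 0 and w3 <= 0):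
--                 pixels[y][x] = color
--
-- def generate_test_image(size: int = 256) -> List[List[Pixel]]:
--     img = create_image(size, size, (240, 240, 240))
--     draw_rectangle(img, (30, 30), (120, 200), (200, 60, 60))
--     draw_circle(img, (180, 90), 50, (60, 120, 220))
--     draw_triangle(img, (160, 170), (230, 210), (200, 120), (70, 180, 80))
--     # Add grid lines
--     for y in range(0, size, 16):
--         for x in range(size):
--             img[y][x] = (100, 100, 100)
--     for x in range(0, size, 16):
--         for y in range(size):
--             img[y][x] = (100, 100, 100)
--     return img
-- ===== SOURCE B (Python) =====
-- from typing import List, Tuple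
--
-- Pixel = Tuple[int, int, int]
--
-- GRAY = (100, 100, 100)
-- GREEN = (70, 180, 80)
-- BLUE = (60, 120, 220)
-- RED = (200, 60, 60)
-- BG = (240, 240, 240)
--
-- def generate_test_image(size: int = 256) -> List[List[Pixel]]:
--     # one pass: each pixel's final colour is computed once, testing the shapes in
--     # reverse draw order (grid > triangle > circle > rectangle > background)
--     img: List[List[Pixel]] = []
--     for y in range(size):
--         if y % 16 == 0:
--             img.append([GRAY] * size)
--             continue
--         tri_y = 120 <= y <= 210
--         dy2 = (y - 90) ** 2
--         rect_y = 30 <= y < 200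
--         row: List[Pixel] = []
--         for x in range(size):
--             if x % 16 == 0:
--                 row.append(GRAY)
--             elif tri_y and 160 <= x <= 230 and _in_triangle(x, y):
--                 row.append(GREEN)
--             elif dy2 <= 2500 and (x - 180) ** 2 + dy2 <= 2500:
--                 row.append(BLUE)
--             elif rect_y and 30 <= x < 120:
--                 row.append(RED)
--             else:
--                 row.append(BG)
--         img.append(row)
--     return img
--
-- def _in_triangle(x: int, y: int) -> bool:
--     # barycentric sign tests against the fixed triangle (160,170),(230,210),(200,120)
--     w1 = (x - 230) * (120 - 210) - (y - 210) * (200 - 230)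
--     w2 = (x - 200) * (170 - 120) - (y - 120) * (160 - 200)
--     w3 = (x - 160) * (210 - 170) - (y - 170) * (230 - 160)
--     return (w1 >= 0 and w2 >= 0 and w3 >= 0) or (w1 <= 0 and w2 <= 0 and w3 <= 0)
-- ===== Notes on version B (the rewrite author's own statement) =====
-- stated objective: alternative
-- what changed: Instead of allocating a background canvas and mutating it in five passes (rectangle, circle, triangle, two grid-line loops), B builds each row once, deciding every pixel's final colour with a single early-exit test chain in reverse draw order (grid > triangle > circle > rectangle > background), emitting grid rows wholesale and hoisting y-dependent subexpressions out of the inner loop; intended as faster, measured 1.81x at n=1024 but unconfirmed at the largest timing size.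
import Mathlib
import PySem

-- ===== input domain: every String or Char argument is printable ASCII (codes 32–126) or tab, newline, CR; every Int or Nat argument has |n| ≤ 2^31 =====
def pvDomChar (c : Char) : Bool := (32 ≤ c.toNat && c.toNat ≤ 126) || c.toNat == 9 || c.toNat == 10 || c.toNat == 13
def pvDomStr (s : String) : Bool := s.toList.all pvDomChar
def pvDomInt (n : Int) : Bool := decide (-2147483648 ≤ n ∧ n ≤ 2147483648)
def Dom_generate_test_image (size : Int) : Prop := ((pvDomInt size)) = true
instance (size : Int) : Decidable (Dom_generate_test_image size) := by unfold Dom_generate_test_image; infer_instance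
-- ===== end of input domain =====

-- B replaces A's five mutating canvas passes by building each row once, deciding every pixel's
-- final colour with one early-exit test chain in reverse draw order (alternative decomposition);
-- A mutates only its own freshly built list, so return-value equivalence is the whole behaviour.


-- ===== PORT A =====
abbrev pvImg := List (List (Int × Int × Int))

def pvCreateImage (width height : Int) (color : Int × Int × Int) : pvImg :=
  (PySem.List.pyRange 0 height 1).map (fun _ => (PySem.List.pyRange 0 width 1).map (fun _ => color))

-- pixels[y][x] = color; exact for the nonnegative in-range indices A's loops produce (Pre_ keeps them in range)
def pvSet2 (pixels : pvImg) (y x : Int) (c : Int × Int × Int) : pvImg :=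
  pixels.set y.toNat ((pixels.getD y.toNat []).set x.toNat c)

def pvEdge (a b c : Int × Int) : Int := (c.1 - a.1) * (b.2 - a.2) - (c.2 - a.2) * (b.1 - a.1)

def pvDrawRectangle (pixels : pvImg) (topLeft bottomRight : Int × Int) (color : Int × Int × Int) : pvImg :=
  (PySem.List.pyRange (max 0 topLeft.2) (min (PySem.List.len pixels) bottomRight.2) 1).foldl
    (fun px y =>
      (PySem.List.pyRange (max 0 topLeft.1) (min (PySem.List.len (px.getD 0 [])) bottomRight.1) 1).foldl
        (fun px2 x => pvSet2 px2 y x color) px) pixels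

def pvDrawCircle (pixels : pvImg) (center : Int × Int) (radius : Int) (color : Int × Int × Int) : pvImg :=
  (PySem.List.pyRange 0 (PySem.List.len pixels) 1).foldl
    (fun px y =>
      (PySem.List.pyRange 0 (PySem.List.len (px.getD 0 [])) 1).foldl
        (fun px2 x => if (x - center.1) ^ 2 + (y - center.2) ^ 2 ≤ radius ^ 2 then pvSet2 px2 y x color else px2) px) pixels

def pvDrawTriangle (pixels : pvImg) (p1 p2 p3 : Int × Int) (color : Int × Int × Int) : pvImg :=
  let min_x := max 0 (min p1.1 (min p2.1 p3.1))
  let max_x := min (PySem.List.len (pixels.getD 0 []) - 1) (max p1.1 (max p2.1 p3.1))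
  let min_y := max 0 (min p1.2 (min p2.2 p3.2))
  let max_y := min (PySem.List.len pixels - 1) (max p1.2 (max p2.2 p3.2))
  let area := pvEdge p1 p2 p3
  if area = 0 then pixels else
  (PySem.List.pyRange min_y (max_y + 1) 1).foldl
    (fun px y =>
      (PySem.List.pyRange min_x (max_x + 1) 1).foldl
        (fun px2 x =>
          let w1 := pvEdge p2 p3 (x, y)
          let w2 := pvEdge p3 p1 (x, y)
          let w3 := pvEdge p1 p2 (x, y)
          if (0 ≤ w1 ∧ 0 ≤ w2 ∧ 0 ≤ w3) ∨ (w1 ≤ 0 ∧ w2 ≤ 0 ∧ w3 ≤ 0) then pvSet2 px2 y x color else px2) px) pixels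

def generate_test_image (size : Int) : List (List (Int × Int × Int)) :=
  let img := pvCreateImage size size (240, 240, 240)
  let img := pvDrawRectangle img (30, 30) (120, 200) (200, 60, 60)
  let img := pvDrawCircle img (180, 90) 50 (60, 120, 220)
  let img := pvDrawTriangle img (160, 170) (230, 210) (200, 120) (70, 180, 80)
  let img := (PySem.List.pyRange 0 size 16).foldl
    (fun im y => (PySem.List.pyRange 0 size 1).foldl (fun im2 x => pvSet2 im2 y x (100, 100, 100)) im) img
  let img := (PySem.List.pyRange 0 size 16).foldl
    (fun im x => (PySem.List.pyRange 0 size 1).foldl (fun im2 y => pvSet2 im2 y x (100, 100, 100)) im) img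
  img

-- ===== PORT B =====
-- Source B's _in_triangle helper: the barycentric sign tests against the fixed triangle
abbrev pvInTriangle (x y : Int) : Prop :=
  let w1 := (x - 230) * (120 - 210) - (y - 210) * (200 - 230)
  let w2 := (x - 200) * (170 - 120) - (y - 120) * (160 - 200)
  let w3 := (x - 160) * (210 - 170) - (y - 170) * (230 - 160)
  (0 ≤ w1 ∧ 0 ≤ w2 ∧ 0 ≤ w3) ∨ (w1 ≤ 0 ∧ w2 ≤ 0 ∧ w3 ≤ 0)

def generate_test_image_alt (size : Int) : List (List (Int × Int × Int)) :=
  (PySem.List.pyRange 0 size 1).foldl (fun img y =>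
    if PySem.Int.mod y 16 = 0 then
      img ++ [List.replicate size.toNat (100, 100, 100)]   -- [GRAY] * size
    else
      let tri_y := 120 ≤ y ∧ y ≤ 210
      let dy2 := (y - 90) ^ 2
      let rect_y := 30 ≤ y ∧ y < 200
      img ++ [(PySem.List.pyRange 0 size 1).foldl (fun row x =>
        if PySem.Int.mod x 16 = 0 then row ++ [(100, 100, 100)]
        else if tri_y ∧ 160 ≤ x ∧ x ≤ 230 ∧ pvInTriangle x y then row ++ [(70, 180, 80)]
        else if dy2 ≤ 2500 ∧ (x - 180) ^ 2 + dy2 ≤ 2500 then row ++ [(60, 120, 220)]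
        else if rect_y ∧ 30 ≤ x ∧ x < 120 then row ++ [(200, 60, 60)]
        else row ++ [(240, 240, 240)]) []]) []

-- ===== PRECONDITION & SPEC =====
-- A indexes pixels[0] unconditionally in draw_triangle, so it raises IndexError on the empty image (size ≤ 0).
def Pre_generate_test_image (size : Int) : Prop := 1 ≤ size
instance (size : Int) : Decidable (Pre_generate_test_image size) := by unfold Pre_generate_test_image; infer_instance
def pvWitness_generate_test_image : Int := (5)

def Spec_generate_test_image (size : Int) (out : List (List (Int × Int × Int))) : Prop := out = generate_test_image_alt size
instance (size : Int) (out : List (List (Int × Int × Int))) : Decidable (Spec_generate_test_image size out) := by unfold Spec_generate_test_image; infer_instance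

-- ===== CLAIM (what is proved, stated in full; the proofs are below) =====
def Claim_equal_generate_test_image : Prop := ∀ (size : Int), Dom_generate_test_image size → Pre_generate_test_image size → Spec_generate_test_image size (generate_test_image size)

-- ===== LEMMAS AND PROOFS =====

-- the value of pixel (row j, column i); default only read out of range
def pvGet2 (img : pvImg) (j i : Nat) : Int × Int × Int := (img.getD j []).getD i (240, 240, 240)

theorem pv_len_set2 (img : pvImg) (y x : Int) (c : Int × Int × Int) :
    (pvSet2 img y x c).length = img.length := by
  simp [pvSet2]
theorem pv_rowlen_set2 (img : pvImg) (y x : Int) (c : Int × Int × Int) (j : Nat) :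
    ((pvSet2 img y x c).getD j []).length = ((img.getD j []).length) := by
  unfold pvSet2
  generalize y.toNat = k
  generalize x.toNat = m
  simp only [List.getD_eq_getElem?_getD, List.getElem?_set]
  by_cases hj : k = j
  · subst hj
    by_cases hk : k < img.length <;> simp [hk]
  · simp [hj]

theorem pv_get2_set2 (img : pvImg) (y x : Int) (c : Int × Int × Int) (j i : Nat) :
    pvGet2 (pvSet2 img y x c) j i =
      if j = y.toNat ∧ i = x.toNat ∧ y.toNat < img.length ∧ x.toNat < (img.getD y.toNat []).length
      then c else pvGet2 img j i := by
  unfold pvGet2 pvSet2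
  generalize y.toNat = k
  generalize x.toNat = m
  simp only [List.getD_eq_getElem?_getD, List.getElem?_set]
  by_cases hj : k = j
  · subst hj
    by_cases hk : k < img.length
    · simp only [if_pos rfl, if_pos hk, Option.getD_some, List.getElem?_set,
        List.getElem?_eq_getElem hk]
      by_cases hi : m = i
      · subst hi
        by_cases hm : m < img[k].length
        · simp [List.getElem?_set, hm, hk]
        · simp [List.getElem?_set, hm]
      · simp [List.getElem?_set, hi, Ne.symm hi]
    · have h1 : ¬ (k = k ∧ i = m ∧ k < img.length ∧ m < (img[k]?.getD []).length) :=
        fun hc => hk hc.2.2.1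
      have hnone : img[k]? = none := List.getElem?_eq_none (by omega)
      simp [hk, hnone, h1]
  · have h1 : ∀ (P : Prop), ¬ (j = k ∧ P) := fun _ hc => hj hc.1.symm
    simp [hj, h1]
theorem pv_lens_foldl (f : pvImg → Int → pvImg) (pos : Int → Int × Int) (p : Int → Prop)
    [DecidablePred p] (c : Int × Int × Int)
    (hf : ∀ px v, f px v = if p v then pvSet2 px (pos v).1 (pos v).2 c else px) :
    ∀ (L : List Int) (img : pvImg),
      (L.foldl f img).length = img.length ∧
        ∀ j : Nat, ((L.foldl f img).getD j []).length = (img.getD j []).length := by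
  intro L
  induction L with
  | nil => intro img; simp
  | cons v L ih =>
    intro img
    have hstep : (f img v).length = img.length ∧
        ∀ j : Nat, ((f img v).getD j []).length = (img.getD j []).length := by
      rw [hf]
      by_cases hp : p v
      · rw [if_pos hp]
        exact ⟨pv_len_set2 _ _ _ _, fun j => pv_rowlen_set2 _ _ _ _ j⟩
      · rw [if_neg hp]
        exact ⟨rfl, fun j => rfl⟩
    have := ih (f img v)
    exact ⟨by simp only [List.foldl_cons]; rw [this.1, hstep.1],
      fun j => by simp only [List.foldl_cons]; rw [this.2 j, hstep.2 j]⟩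

theorem pv_get2_foldl (f : pvImg → Int → pvImg) (pos : Int → Int × Int) (p : Int → Prop)
    [DecidablePred p] (c : Int × Int × Int)
    (hf : ∀ px v, f px v = if p v then pvSet2 px (pos v).1 (pos v).2 c else px) :
    ∀ (L : List Int) (img : pvImg) (j i : Nat),
      pvGet2 (L.foldl f img) j i =
        if ∃ v ∈ L, p v ∧ j = (pos v).1.toNat ∧ i = (pos v).2.toNat ∧
            (pos v).1.toNat < img.length ∧ (pos v).2.toNat < (img.getD (pos v).1.toNat []).length
        then c else pvGet2 img j i := by
  intro L
  induction L with
  | nil => intro img j i; simp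
  | cons v L ih =>
    intro img j i
    have hstep : (f img v).length = img.length ∧
        ∀ j : Nat, ((f img v).getD j []).length = (img.getD j []).length := by
      rw [hf]
      by_cases hp : p v
      · rw [if_pos hp]
        exact ⟨pv_len_set2 _ _ _ _, fun j => pv_rowlen_set2 _ _ _ _ j⟩
      · rw [if_neg hp]
        exact ⟨rfl, fun j => rfl⟩
    simp only [List.foldl_cons]
    rw [ih (f img v) j i]
    have hbase : pvGet2 (f img v) j i =
        if p v ∧ j = (pos v).1.toNat ∧ i = (pos v).2.toNat ∧
            (pos v).1.toNat < img.length ∧ (pos v).2.toNat < (img.getD (pos v).1.toNat []).length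
        then c else pvGet2 img j i := by
      rw [hf]
      by_cases hp : p v
      · rw [if_pos hp, pv_get2_set2]
        by_cases h : j = (pos v).1.toNat ∧ i = (pos v).2.toNat ∧
            (pos v).1.toNat < img.length ∧ (pos v).2.toNat < (img.getD (pos v).1.toNat []).length
        · rw [if_pos h, if_pos ⟨hp, h⟩]
        · rw [if_neg h, if_neg (fun hc => h hc.2)]
      · rw [if_neg hp, if_neg (fun hc => hp hc.1)]
    by_cases hR : ∃ v' ∈ L, p v' ∧ j = (pos v').1.toNat ∧ i = (pos v').2.toNat ∧
        (pos v').1.toNat < img.length ∧ (pos v').2.toNat < (img.getD (pos v').1.toNat []).length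
    · have hR' : ∃ v' ∈ L, p v' ∧ j = (pos v').1.toNat ∧ i = (pos v').2.toNat ∧
          (pos v').1.toNat < (f img v).length ∧
          (pos v').2.toNat < ((f img v).getD (pos v').1.toNat []).length := by
        obtain ⟨w, hw, h1, h2, h3, h4, h5⟩ := hR
        exact ⟨w, hw, h1, h2, h3, by rw [hstep.1]; exact h4, by rw [hstep.2]; exact h5⟩
      rw [if_pos hR']
      rw [if_pos (by obtain ⟨w, hw, hrest⟩ := hR; exact ⟨w, List.mem_cons_of_mem _ hw, hrest⟩)]
    · have hR' : ¬ ∃ v' ∈ L, p v' ∧ j = (pos v').1.toNat ∧ i = (pos v').2.toNat ∧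
          (pos v').1.toNat < (f img v).length ∧
          (pos v').2.toNat < ((f img v).getD (pos v').1.toNat []).length := by
        intro ⟨w, hw, h1, h2, h3, h4, h5⟩
        exact hR ⟨w, hw, h1, h2, h3, by rw [← hstep.1]; exact h4, by rw [← hstep.2]; exact h5⟩
      rw [if_neg hR', hbase]
      by_cases hv : p v ∧ j = (pos v).1.toNat ∧ i = (pos v).2.toNat ∧
          (pos v).1.toNat < img.length ∧ (pos v).2.toNat < (img.getD (pos v).1.toNat []).length
      · rw [if_pos hv, if_pos ⟨v, List.mem_cons_self, hv⟩]
      · rw [if_neg hv, if_neg (by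
          intro ⟨w, hw, hrest⟩
          rcases List.mem_cons.1 hw with rfl | hw'
          · exact hv hrest
          · exact hR ⟨w, hw', hrest⟩)]
theorem pv_pass (F : pvImg → Int → pvImg) (Lx : pvImg → List Int) (pos : Int → Int → Int × Int)
    (p : Int → Int → Prop) [∀ o v, Decidable (p o v)] (c : Int × Int × Int)
    (hF : ∀ px o, F px o = (Lx px).foldl
      (fun px2 v => if p o v then pvSet2 px2 (pos o v).1 (pos o v).2 c else px2) px)
    (hLx : ∀ px y x (c' : Int × Int × Int), Lx (pvSet2 px y x c') = Lx px) :
    ∀ (Ly : List Int) (img : pvImg),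
      ((Ly.foldl F img).length = img.length ∧
        ∀ j : Nat, ((Ly.foldl F img).getD j []).length = (img.getD j []).length) ∧
      ∀ j i : Nat,
        pvGet2 (Ly.foldl F img) j i =
          if ∃ o ∈ Ly, ∃ v ∈ Lx img, p o v ∧ j = (pos o v).1.toNat ∧ i = (pos o v).2.toNat ∧
              (pos o v).1.toNat < img.length ∧
              (pos o v).2.toNat < (img.getD (pos o v).1.toNat []).length
          then c else pvGet2 img j i := by
  have hLxF0 : ∀ (M : List Int) (o : Int) (px : pvImg),
      Lx (M.foldl (fun px2 v => if p o v then pvSet2 px2 (pos o v).1 (pos o v).2 c else px2) px)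
        = Lx px := by
    intro M o
    induction M with
    | nil => intro px; rfl
    | cons v M ihM =>
      intro px
      simp only [List.foldl_cons]
      rw [ihM]
      by_cases hp : p o v
      · rw [if_pos hp, hLx]
      · rw [if_neg hp]
  have hLxF : ∀ px o, Lx (F px o) = Lx px := by
    intro px o
    rw [hF]
    exact hLxF0 (Lx px) o px
  have hstep : ∀ px o, (F px o).length = px.length ∧
      ∀ j : Nat, ((F px o).getD j []).length = (px.getD j []).length := by
    intro px o
    rw [hF]
    exact pv_lens_foldl _ (pos o) (p o) c (fun _ _ => rfl) (Lx px) px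
  intro Ly
  induction Ly with
  | nil => intro img; exact ⟨⟨rfl, fun j => rfl⟩, fun j i => by simp⟩
  | cons o Ly ih =>
    intro img
    obtain ⟨⟨ihl, ihr⟩, ihg⟩ := ih (F img o)
    have hso := hstep img o
    refine ⟨⟨by simp only [List.foldl_cons]; rw [ihl, hso.1],
      fun j => by simp only [List.foldl_cons]; rw [ihr j, hso.2 j]⟩, ?_⟩
    intro j i
    simp only [List.foldl_cons]
    rw [ihg j i]
    have hbase : pvGet2 (F img o) j i =
        if ∃ v ∈ Lx img, p o v ∧ j = (pos o v).1.toNat ∧ i = (pos o v).2.toNat ∧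
            (pos o v).1.toNat < img.length ∧
            (pos o v).2.toNat < (img.getD (pos o v).1.toNat []).length
        then c else pvGet2 img j i := by
      rw [hF]
      exact pv_get2_foldl _ (pos o) (p o) c (fun _ _ => rfl) (Lx img) img j i
    -- condition transport from (F img o) to img
    have hiff : ∀ o' v', ((pos o' v').1.toNat < (F img o).length ∧
          (pos o' v').2.toNat < ((F img o).getD (pos o' v').1.toNat []).length) ↔
        ((pos o' v').1.toNat < img.length ∧
          (pos o' v').2.toNat < (img.getD (pos o' v').1.toNat []).length) := by
      intro o' v'
      rw [hso.1, hso.2]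
    by_cases hR : ∃ o' ∈ Ly, ∃ v ∈ Lx img, p o' v ∧ j = (pos o' v).1.toNat ∧
        i = (pos o' v).2.toNat ∧ (pos o' v).1.toNat < img.length ∧
        (pos o' v).2.toNat < (img.getD (pos o' v).1.toNat []).length
    · rw [if_pos (by
        obtain ⟨o', ho', v, hv, h1, h2, h3, h4, h5⟩ := hR
        exact ⟨o', ho', v, by rw [hLxF]; exact hv, h1, h2, h3, ((hiff o' v).2 ⟨h4, h5⟩).1,
          ((hiff o' v).2 ⟨h4, h5⟩).2⟩)]
      rw [if_pos (by
        obtain ⟨o', ho', rest⟩ := hR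
        exact ⟨o', List.mem_cons_of_mem _ ho', rest⟩)]
    · rw [if_neg (by
        intro ⟨o', ho', v, hv, h1, h2, h3, h4, h5⟩
        exact hR ⟨o', ho', v, by rw [hLxF] at hv; exact hv, h1, h2, h3,
          ((hiff o' v).1 ⟨h4, h5⟩).1, ((hiff o' v).1 ⟨h4, h5⟩).2⟩)]
      rw [hbase]
      by_cases hv : ∃ v ∈ Lx img, p o v ∧ j = (pos o v).1.toNat ∧ i = (pos o v).2.toNat ∧
          (pos o v).1.toNat < img.length ∧
          (pos o v).2.toNat < (img.getD (pos o v).1.toNat []).length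
      · rw [if_pos hv, if_pos (by
          obtain ⟨v, hvm, rest⟩ := hv
          exact ⟨o, List.mem_cons_self, v, hvm, rest⟩)]
      · rw [if_neg hv, if_neg (by
          intro ⟨o', ho', v, hvm, rest⟩
          rcases List.mem_cons.1 ho' with rfl | ho''
          · exact hv ⟨v, hvm, rest⟩
          · exact hR ⟨o', ho'', v, hvm, rest⟩)]
theorem pv_ex2_elim (a b a' b' s s' : Int) (hs : 0 < s) (hs' : 0 < s') (ha : 0 ≤ a) (ha' : 0 ≤ a')
    (j i : Nat) (p Q : Int → Int → Prop) :
    (∃ o ∈ PySem.List.pyRange a b s, ∃ v ∈ PySem.List.pyRange a' b' s',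
        p o v ∧ j = o.toNat ∧ i = v.toNat ∧ Q o v)
    ↔ (a ≤ (j:Int) ∧ (j:Int) < b ∧ s ∣ (j:Int) - a ∧ a' ≤ (i:Int) ∧ (i:Int) < b' ∧
        s' ∣ (i:Int) - a' ∧ p (j:Int) (i:Int) ∧ Q (j:Int) (i:Int)) := by
  constructor
  · rintro ⟨o, ho, v, hv, hp, hj, hi, hQ⟩
    obtain ⟨h1, h2, h3⟩ := (PySem.List.mem_pyRange_iff_of_pos hs o).1 ho
    obtain ⟨h4, h5, h6⟩ := (PySem.List.mem_pyRange_iff_of_pos hs' v).1 hv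
    have ho0 : 0 ≤ o := le_trans ha h1
    have hv0 : 0 ≤ v := le_trans ha' h4
    have hoj : (j : Int) = o := by rw [hj, Int.toNat_of_nonneg ho0]
    have hvi : (i : Int) = v := by rw [hi, Int.toNat_of_nonneg hv0]
    rw [hoj, hvi]
    exact ⟨h1, h2, h3, h4, h5, h6, hp, hQ⟩
  · rintro ⟨h1, h2, h3, h4, h5, h6, hp, hQ⟩
    exact ⟨(j : Int), (PySem.List.mem_pyRange_iff_of_pos hs _).2 ⟨h1, h2, h3⟩,
      (i : Int), (PySem.List.mem_pyRange_iff_of_pos hs' _).2 ⟨h4, h5, h6⟩,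
      hp, (Int.toNat_natCast j).symm, (Int.toNat_natCast i).symm, hQ⟩

theorem pv_ex2_elim_swap (a b a' b' s s' : Int) (hs : 0 < s) (hs' : 0 < s') (ha : 0 ≤ a) (ha' : 0 ≤ a')
    (j i : Nat) (p Q : Int → Int → Prop) :
    (∃ o ∈ PySem.List.pyRange a b s, ∃ v ∈ PySem.List.pyRange a' b' s',
        p o v ∧ j = v.toNat ∧ i = o.toNat ∧ Q o v)
    ↔ (a ≤ (i:Int) ∧ (i:Int) < b ∧ s ∣ (i:Int) - a ∧ a' ≤ (j:Int) ∧ (j:Int) < b' ∧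
        s' ∣ (j:Int) - a' ∧ p (i:Int) (j:Int) ∧ Q (i:Int) (j:Int)) := by
  constructor
  · rintro ⟨o, ho, v, hv, hp, hj, hi, hQ⟩
    obtain ⟨h1, h2, h3⟩ := (PySem.List.mem_pyRange_iff_of_pos hs o).1 ho
    obtain ⟨h4, h5, h6⟩ := (PySem.List.mem_pyRange_iff_of_pos hs' v).1 hv
    have ho0 : 0 ≤ o := le_trans ha h1
    have hv0 : 0 ≤ v := le_trans ha' h4
    have hoj : (i : Int) = o := by rw [hi, Int.toNat_of_nonneg ho0]
    have hvi : (j : Int) = v := by rw [hj, Int.toNat_of_nonneg hv0]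
    rw [hoj, hvi]
    exact ⟨h1, h2, h3, h4, h5, h6, hp, hQ⟩
  · rintro ⟨h1, h2, h3, h4, h5, h6, hp, hQ⟩
    exact ⟨(i : Int), (PySem.List.mem_pyRange_iff_of_pos hs _).2 ⟨h1, h2, h3⟩,
      (j : Int), (PySem.List.mem_pyRange_iff_of_pos hs' _).2 ⟨h4, h5, h6⟩,
      hp, (Int.toNat_natCast j).symm, (Int.toNat_natCast i).symm, hQ⟩
theorem pv_create_len (n : Int) (c : Int × Int × Int) : (pvCreateImage n n c).length = n.toNat := by
  simp [pvCreateImage, PySem.List.length_pyRange_one]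

theorem pv_create_row (n : Int) (c : Int × Int × Int) (k : Nat) :
    ((pvCreateImage n n c).getD k []).length = if k < n.toNat then n.toNat else 0 := by
  unfold pvCreateImage
  by_cases hk : k < n.toNat
  · have hk' : k < ((PySem.List.pyRange 0 n 1).map
        (fun _ => (PySem.List.pyRange 0 n 1).map (fun _ => c))).length := by
      simpa [PySem.List.length_pyRange_one] using hk
    rw [List.getD_eq_getElem _ _ hk']
    simp [PySem.List.length_pyRange_one, hk]
  · rw [List.getD_eq_default _ _ (by simpa [PySem.List.length_pyRange_one] using hk)]
    simp [hk]

theorem pv_create_get2 (n : Int) (c : Int × Int × Int) (j i : Nat)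
    (hj : j < n.toNat) (hi : i < n.toNat) : pvGet2 (pvCreateImage n n c) j i = c := by
  unfold pvGet2 pvCreateImage
  have hj' : j < ((PySem.List.pyRange 0 n 1).map
      (fun _ => (PySem.List.pyRange 0 n 1).map (fun _ => c))).length := by
    simpa [PySem.List.length_pyRange_one] using hj
  rw [List.getD_eq_getElem _ _ hj']
  simp only [List.getElem_map]
  rw [List.getD_eq_getElem _ _ (by simpa [PySem.List.length_pyRange_one] using hi)]
  simp

theorem pv_rect_char (img : pvImg) (N : Nat) (hlen : img.length = N)
    (hrow : ∀ k : Nat, (img.getD k []).length = if k < N then N else 0) :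
    ((pvDrawRectangle img (30, 30) (120, 200) (200, 60, 60)).length = N ∧
      ∀ k : Nat, ((pvDrawRectangle img (30, 30) (120, 200) (200, 60, 60)).getD k []).length =
        if k < N then N else 0) ∧
    ∀ j i : Nat, j < N → i < N →
      pvGet2 (pvDrawRectangle img (30, 30) (120, 200) (200, 60, 60)) j i =
        if 30 ≤ (i:Int) ∧ (i:Int) < 120 ∧ 30 ≤ (j:Int) ∧ (j:Int) < 200
        then (200, 60, 60) else pvGet2 img j i := by
  have hpass := pv_pass
    (fun px y => (PySem.List.pyRange (max 0 (30:Int))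
        (min (PySem.List.len (px.getD 0 [])) 120) 1).foldl
      (fun px2 x => pvSet2 px2 y x (200, 60, 60)) px)
    (fun px => PySem.List.pyRange (max 0 (30:Int)) (min (PySem.List.len (px.getD 0 [])) 120) 1)
    (fun o v => (o, v)) (fun _ _ => True) (200, 60, 60)
    (by intro px o; simp)
    (by
      intro px y x c'
      beta_reduce
      rw [show PySem.List.len ((pvSet2 px y x c').getD 0 []) = PySem.List.len (px.getD 0 [])
        from by simp only [PySem.List.len_eq, pv_rowlen_set2]])
    (PySem.List.pyRange (max 0 (30:Int)) (min (PySem.List.len img) 200) 1) img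
  have hEq : pvDrawRectangle img (30, 30) (120, 200) (200, 60, 60) =
      (PySem.List.pyRange (max 0 (30:Int)) (min (PySem.List.len img) 200) 1).foldl
        (fun px y => (PySem.List.pyRange (max 0 (30:Int))
            (min (PySem.List.len (px.getD 0 [])) 120) 1).foldl
          (fun px2 x => pvSet2 px2 y x (200, 60, 60)) px) img := rfl
  rw [hEq]
  refine ⟨⟨by rw [hpass.1.1, hlen], fun k => by rw [hpass.1.2 k, hrow k]⟩, ?_⟩
  intro j i hj hi
  rw [hpass.2 j i]
  refine if_congr ?_ rfl rfl
  rw [pv_ex2_elim _ _ _ _ 1 1 one_pos one_pos (le_max_left 0 30) (le_max_left 0 30) j i]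
  simp only [Int.toNat_natCast, PySem.List.len_eq, hlen, hrow]
  rw [if_pos hj, if_pos (show (0:Nat) < N by omega)]
  constructor
  · rintro ⟨h1, h2, h3, h4, h5, h6, h7, h8, h9⟩
    omega
  · rintro ⟨h1, h2, h3, h4⟩
    refine ⟨by omega, by omega, one_dvd _, by omega, by omega, one_dvd _, trivial, by omega, by omega⟩
theorem pv_circle_char (img : pvImg) (N : Nat) (hlen : img.length = N)
    (hrow : ∀ k : Nat, (img.getD k []).length = if k < N then N else 0) :
    ((pvDrawCircle img (180, 90) 50 (60, 120, 220)).length = N ∧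
      ∀ k : Nat, ((pvDrawCircle img (180, 90) 50 (60, 120, 220)).getD k []).length =
        if k < N then N else 0) ∧
    ∀ j i : Nat, j < N → i < N →
      pvGet2 (pvDrawCircle img (180, 90) 50 (60, 120, 220)) j i =
        if ((i:Int) - 180) ^ 2 + ((j:Int) - 90) ^ 2 ≤ 2500
        then (60, 120, 220) else pvGet2 img j i := by
  have hpass := pv_pass
    (fun px y => (PySem.List.pyRange 0 (PySem.List.len (px.getD 0 [])) 1).foldl
      (fun px2 x => if (x - 180) ^ 2 + (y - 90) ^ 2 ≤ (50:Int) ^ 2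
        then pvSet2 px2 y x (60, 120, 220) else px2) px)
    (fun px => PySem.List.pyRange 0 (PySem.List.len (px.getD 0 [])) 1)
    (fun o v => (o, v)) (fun o v => (v - 180) ^ 2 + (o - 90) ^ 2 ≤ (50:Int) ^ 2) (60, 120, 220)
    (by intro px o; rfl)
    (by
      intro px y x c'
      beta_reduce
      rw [show PySem.List.len ((pvSet2 px y x c').getD 0 []) = PySem.List.len (px.getD 0 [])
        from by simp only [PySem.List.len_eq, pv_rowlen_set2]])
    (PySem.List.pyRange 0 (PySem.List.len img) 1) img
  have hEq : pvDrawCircle img (180, 90) 50 (60, 120, 220) =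
      (PySem.List.pyRange 0 (PySem.List.len img) 1).foldl
        (fun px y => (PySem.List.pyRange 0 (PySem.List.len (px.getD 0 [])) 1).foldl
          (fun px2 x => if (x - 180) ^ 2 + (y - 90) ^ 2 ≤ (50:Int) ^ 2
            then pvSet2 px2 y x (60, 120, 220) else px2) px) img := rfl
  rw [hEq]
  refine ⟨⟨by rw [hpass.1.1, hlen], fun k => by rw [hpass.1.2 k, hrow k]⟩, ?_⟩
  intro j i hj hi
  rw [hpass.2 j i]
  refine if_congr ?_ rfl rfl
  rw [pv_ex2_elim _ _ _ _ 1 1 one_pos one_pos le_rfl le_rfl j i]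
  simp only [Int.toNat_natCast, PySem.List.len_eq, hlen, hrow]
  rw [if_pos hj, if_pos (show (0:Nat) < N by omega)]
  have h2500 : ((50:Int)) ^ 2 = 2500 := by norm_num
  rw [h2500]
  constructor
  · rintro ⟨h1, h2, h3, h4, h5, h6, h7, h8⟩
    exact h7
  · intro h
    refine ⟨by omega, by omega, one_dvd _, by omega, by omega, one_dvd _, h, by omega, by omega⟩

theorem pv_tri_char (img : pvImg) (N : Nat) (hlen : img.length = N)
    (hrow : ∀ k : Nat, (img.getD k []).length = if k < N then N else 0) :
    ((pvDrawTriangle img (160, 170) (230, 210) (200, 120) (70, 180, 80)).length = N ∧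
      ∀ k : Nat, ((pvDrawTriangle img (160, 170) (230, 210) (200, 120) (70, 180, 80)).getD k []).length =
        if k < N then N else 0) ∧
    ∀ j i : Nat, j < N → i < N →
      pvGet2 (pvDrawTriangle img (160, 170) (230, 210) (200, 120) (70, 180, 80)) j i =
        if (0 ≤ ((i:Int) - 230) * (120 - 210) - ((j:Int) - 210) * (200 - 230) ∧
              0 ≤ ((i:Int) - 200) * (170 - 120) - ((j:Int) - 120) * (160 - 200) ∧
              0 ≤ ((i:Int) - 160) * (210 - 170) - ((j:Int) - 170) * (230 - 160)) ∨
           (((i:Int) - 230) * (120 - 210) - ((j:Int) - 210) * (200 - 230) ≤ 0 ∧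
              ((i:Int) - 200) * (170 - 120) - ((j:Int) - 120) * (160 - 200) ≤ 0 ∧
              ((i:Int) - 160) * (210 - 170) - ((j:Int) - 170) * (230 - 160) ≤ 0)
        then (70, 180, 80) else pvGet2 img j i := by
  have hpass := pv_pass
    (fun px y => (PySem.List.pyRange 160 (min (PySem.List.len (img.getD 0 []) - 1) 230 + 1) 1).foldl
      (fun px2 x =>
        if (0 ≤ pvEdge (230, 210) (200, 120) (x, y) ∧ 0 ≤ pvEdge (200, 120) (160, 170) (x, y) ∧
              0 ≤ pvEdge (160, 170) (230, 210) (x, y)) ∨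
           (pvEdge (230, 210) (200, 120) (x, y) ≤ 0 ∧ pvEdge (200, 120) (160, 170) (x, y) ≤ 0 ∧
              pvEdge (160, 170) (230, 210) (x, y) ≤ 0)
        then pvSet2 px2 y x (70, 180, 80) else px2) px)
    (fun _ => PySem.List.pyRange 160 (min (PySem.List.len (img.getD 0 []) - 1) 230 + 1) 1)
    (fun o v => (o, v))
    (fun o v => (0 ≤ pvEdge (230, 210) (200, 120) (v, o) ∧ 0 ≤ pvEdge (200, 120) (160, 170) (v, o) ∧
              0 ≤ pvEdge (160, 170) (230, 210) (v, o)) ∨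
           (pvEdge (230, 210) (200, 120) (v, o) ≤ 0 ∧ pvEdge (200, 120) (160, 170) (v, o) ≤ 0 ∧
              pvEdge (160, 170) (230, 210) (v, o) ≤ 0))
    (70, 180, 80)
    (by intro px o; rfl)
    (by intro px y x c'; rfl)
    (PySem.List.pyRange 120 (min (PySem.List.len img - 1) 210 + 1) 1) img
  have hEq : pvDrawTriangle img (160, 170) (230, 210) (200, 120) (70, 180, 80) =
      (PySem.List.pyRange 120 (min (PySem.List.len img - 1) 210 + 1) 1).foldl
        (fun px y => (PySem.List.pyRange 160 (min (PySem.List.len (img.getD 0 []) - 1) 230 + 1) 1).foldl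
          (fun px2 x =>
            if (0 ≤ pvEdge (230, 210) (200, 120) (x, y) ∧ 0 ≤ pvEdge (200, 120) (160, 170) (x, y) ∧
                  0 ≤ pvEdge (160, 170) (230, 210) (x, y)) ∨
               (pvEdge (230, 210) (200, 120) (x, y) ≤ 0 ∧ pvEdge (200, 120) (160, 170) (x, y) ≤ 0 ∧
                  pvEdge (160, 170) (230, 210) (x, y) ≤ 0)
            then pvSet2 px2 y x (70, 180, 80) else px2) px) img := by
    unfold pvDrawTriangle
    norm_num [pvEdge]
  rw [hEq]
  refine ⟨⟨by rw [hpass.1.1, hlen], fun k => by rw [hpass.1.2 k, hrow k]⟩, ?_⟩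
  intro j i hj hi
  rw [hpass.2 j i]
  refine if_congr ?_ rfl rfl
  rw [pv_ex2_elim _ _ _ _ 1 1 one_pos one_pos (by norm_num) (by norm_num) j i]
  simp only [Int.toNat_natCast, PySem.List.len_eq, hlen, hrow]
  rw [if_pos hj, if_pos (show (0:Nat) < N by omega)]
  have e1 : pvEdge (230, 210) (200, 120) ((i:Int), (j:Int)) =
      -90 * (i:Int) + 30 * (j:Int) + 14400 := by unfold pvEdge; ring
  have e2 : pvEdge (200, 120) (160, 170) ((i:Int), (j:Int)) =
      50 * (i:Int) + 40 * (j:Int) - 14800 := by unfold pvEdge; ring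
  have e3 : pvEdge (160, 170) (230, 210) ((i:Int), (j:Int)) =
      40 * (i:Int) - 70 * (j:Int) + 5500 := by unfold pvEdge; ring
  have f1 : ((i:Int) - 230) * (120 - 210) - ((j:Int) - 210) * (200 - 230) =
      -90 * (i:Int) + 30 * (j:Int) + 14400 := by ring
  have f2 : ((i:Int) - 200) * (170 - 120) - ((j:Int) - 120) * (160 - 200) =
      50 * (i:Int) + 40 * (j:Int) - 14800 := by ring
  have f3 : ((i:Int) - 160) * (210 - 170) - ((j:Int) - 170) * (230 - 160) =
      40 * (i:Int) - 70 * (j:Int) + 5500 := by ring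
  rw [e1, e2, e3, f1, f2, f3]
  constructor
  · rintro ⟨h1, h2, h3, h4, h5, h6, h7, h8⟩
    exact h7
  · intro h
    refine ⟨?_, ?_, one_dvd _, ?_, ?_, one_dvd _, h, by omega, by omega⟩ <;> omega
theorem pv_grid1_char (img : pvImg) (N : Nat) (n : Int) (hn : n = (N:Int)) (hlen : img.length = N)
    (hrow : ∀ k : Nat, (img.getD k []).length = if k < N then N else 0) :
    (((PySem.List.pyRange 0 n 16).foldl
        (fun im y => (PySem.List.pyRange 0 n 1).foldl
          (fun im2 x => pvSet2 im2 y x (100, 100, 100)) im) img).length = N ∧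
      ∀ k : Nat, (((PySem.List.pyRange 0 n 16).foldl
        (fun im y => (PySem.List.pyRange 0 n 1).foldl
          (fun im2 x => pvSet2 im2 y x (100, 100, 100)) im) img).getD k []).length =
        if k < N then N else 0) ∧
    ∀ j i : Nat, j < N → i < N →
      pvGet2 ((PySem.List.pyRange 0 n 16).foldl
        (fun im y => (PySem.List.pyRange 0 n 1).foldl
          (fun im2 x => pvSet2 im2 y x (100, 100, 100)) im) img) j i =
        if (16:Int) ∣ (j:Int) then (100, 100, 100) else pvGet2 img j i := by
  have hpass := pv_pass
    (fun im y => (PySem.List.pyRange 0 n 1).foldl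
      (fun im2 x => pvSet2 im2 y x (100, 100, 100)) im)
    (fun _ => PySem.List.pyRange 0 n 1)
    (fun o v => (o, v)) (fun _ _ => True) (100, 100, 100)
    (by intro px o; simp)
    (by intro px y x c'; rfl)
    (PySem.List.pyRange 0 n 16) img
  refine ⟨⟨by rw [hpass.1.1, hlen], fun k => by rw [hpass.1.2 k, hrow k]⟩, ?_⟩
  intro j i hj hi
  rw [hpass.2 j i]
  refine if_congr ?_ rfl rfl
  rw [pv_ex2_elim _ _ _ _ 16 1 (by norm_num) one_pos le_rfl le_rfl j i]
  simp only [Int.toNat_natCast, hlen, hrow, hn]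
  constructor
  · rintro ⟨h1, h2, h3, h4, h5, h6, h7, h8⟩
    simpa using h3
  · intro h
    refine ⟨by omega, by omega, by simpa using h, by omega, by omega, one_dvd _, trivial,
      hj, by simp only [if_pos hj]; exact hi⟩

theorem pv_grid2_char (img : pvImg) (N : Nat) (n : Int) (hn : n = (N:Int)) (hlen : img.length = N)
    (hrow : ∀ k : Nat, (img.getD k []).length = if k < N then N else 0) :
    (((PySem.List.pyRange 0 n 16).foldl
        (fun im x => (PySem.List.pyRange 0 n 1).foldl
          (fun im2 y => pvSet2 im2 y x (100, 100, 100)) im) img).length = N ∧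
      ∀ k : Nat, (((PySem.List.pyRange 0 n 16).foldl
        (fun im x => (PySem.List.pyRange 0 n 1).foldl
          (fun im2 y => pvSet2 im2 y x (100, 100, 100)) im) img).getD k []).length =
        if k < N then N else 0) ∧
    ∀ j i : Nat, j < N → i < N →
      pvGet2 ((PySem.List.pyRange 0 n 16).foldl
        (fun im x => (PySem.List.pyRange 0 n 1).foldl
          (fun im2 y => pvSet2 im2 y x (100, 100, 100)) im) img) j i =
        if (16:Int) ∣ (i:Int) then (100, 100, 100) else pvGet2 img j i := by
  have hpass := pv_pass
    (fun im x => (PySem.List.pyRange 0 n 1).foldl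
      (fun im2 y => pvSet2 im2 y x (100, 100, 100)) im)
    (fun _ => PySem.List.pyRange 0 n 1)
    (fun o v => (v, o)) (fun _ _ => True) (100, 100, 100)
    (by intro px o; simp)
    (by intro px y x c'; rfl)
    (PySem.List.pyRange 0 n 16) img
  refine ⟨⟨by rw [hpass.1.1, hlen], fun k => by rw [hpass.1.2 k, hrow k]⟩, ?_⟩
  intro j i hj hi
  rw [hpass.2 j i]
  refine if_congr ?_ rfl rfl
  rw [pv_ex2_elim_swap _ _ _ _ 16 1 (by norm_num) one_pos le_rfl le_rfl j i]
  simp only [Int.toNat_natCast, hlen, hrow, hn]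
  constructor
  · rintro ⟨h1, h2, h3, h4, h5, h6, h7, h8⟩
    simpa using h3
  · intro h
    refine ⟨by omega, by omega, by simpa using h, by omega, by omega, one_dvd _, trivial,
      hj, by simp only [if_pos hj]; exact hi⟩

-- the single-pixel colour B computes once the row is known not to be a grid row
def pvPix (x y : Int) : Int × Int × Int :=
  if PySem.Int.mod x 16 = 0 then (100, 100, 100)
  else if (120 ≤ y ∧ y ≤ 210) ∧ 160 ≤ x ∧ x ≤ 230 ∧ pvInTriangle x y then (70, 180, 80)
  else if (y - 90) ^ 2 ≤ 2500 ∧ (x - 180) ^ 2 + (y - 90) ^ 2 ≤ 2500 then (60, 120, 220)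
  else if (30 ≤ y ∧ y < 200) ∧ 30 ≤ x ∧ x < 120 then (200, 60, 60)
  else (240, 240, 240)

theorem pv_sign_bounds (x y : Int) (h : pvInTriangle x y) :
    160 ≤ x ∧ x ≤ 230 ∧ 120 ≤ y ∧ y ≤ 210 := by
  simp only [pvInTriangle] at h
  have f1 : (x - 230) * (120 - 210) - (y - 210) * (200 - 230) = -90 * x + 30 * y + 14400 := by
    ring
  have f2 : (x - 200) * (170 - 120) - (y - 120) * (160 - 200) = 50 * x + 40 * y - 14800 := by
    ring
  have f3 : (x - 160) * (210 - 170) - (y - 170) * (230 - 160) = 40 * x - 70 * y + 5500 := by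
    ring
  rw [f1, f2, f3] at h
  omega

theorem pv_A_char (size : Int) (hs : 1 ≤ size) :
    (generate_test_image size).length = size.toNat ∧
    (∀ k : Nat, ((generate_test_image size).getD k []).length =
      if k < size.toNat then size.toNat else 0) ∧
    (∀ j i : Nat, j < size.toNat → i < size.toNat →
      pvGet2 (generate_test_image size) j i =
        if PySem.Int.mod (j:Int) 16 = 0 then (100, 100, 100) else pvPix (i:Int) (j:Int)) := by
  have hn : size = ((size.toNat : Int)) := by omega
  have h1 := pv_rect_char (pvCreateImage size size (240, 240, 240)) size.toNat
    (pv_create_len size (240, 240, 240)) (pv_create_row size (240, 240, 240))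
  have h2 := pv_circle_char _ size.toNat h1.1.1 h1.1.2
  have h3 := pv_tri_char _ size.toNat h2.1.1 h2.1.2
  have h4 := pv_grid1_char _ size.toNat size hn h3.1.1 h3.1.2
  have h5 := pv_grid2_char _ size.toNat size hn h4.1.1 h4.1.2
  have hEq : generate_test_image size =
      (PySem.List.pyRange 0 size 16).foldl
        (fun im x => (PySem.List.pyRange 0 size 1).foldl
          (fun im2 y => pvSet2 im2 y x (100, 100, 100)) im)
        ((PySem.List.pyRange 0 size 16).foldl
          (fun im y => (PySem.List.pyRange 0 size 1).foldl
            (fun im2 x => pvSet2 im2 y x (100, 100, 100)) im)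
          (pvDrawTriangle
            (pvDrawCircle
              (pvDrawRectangle (pvCreateImage size size (240, 240, 240)) (30, 30) (120, 200)
                (200, 60, 60))
              (180, 90) 50 (60, 120, 220))
            (160, 170) (230, 210) (200, 120) (70, 180, 80))) := rfl
  rw [hEq]
  refine ⟨h5.1.1, h5.1.2, ?_⟩
  intro j i hj hi
  rw [h5.2 j i hj hi, h4.2 j i hj hi, h3.2 j i hj hi, h2.2 j i hj hi, h1.2 j i hj hi,
    pv_create_get2 size (240, 240, 240) j i hj hi]
  have mj := PySem.Int.mod_eq_zero_iff_dvd (j:Int) 16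
  have mi := PySem.Int.mod_eq_zero_iff_dvd (i:Int) 16
  unfold pvPix
  by_cases dj : (16:Int) ∣ (j:Int)
  · rw [if_pos (mj.2 dj)]
    by_cases di : (16:Int) ∣ (i:Int)
    · rw [if_pos di]
    · rw [if_neg di, if_pos dj]
  · rw [if_neg (fun h => dj (mj.1 h))]
    by_cases di : (16:Int) ∣ (i:Int)
    · rw [if_pos di, if_pos (mi.2 di)]
    · rw [if_neg di, if_neg dj, if_neg (fun h => di (mi.1 h))]
      by_cases hsgn : pvInTriangle (i:Int) (j:Int)
      · rw [if_pos hsgn]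
        have hb := pv_sign_bounds (i:Int) (j:Int) hsgn
        rw [if_pos ⟨⟨hb.2.2.1, hb.2.2.2⟩, hb.1, hb.2.1, hsgn⟩]
      · rw [if_neg hsgn, if_neg (show ¬((120 ≤ (j:Int) ∧ (j:Int) ≤ 210) ∧ 160 ≤ (i:Int) ∧
          (i:Int) ≤ 230 ∧ pvInTriangle (i:Int) (j:Int)) from fun h => hsgn h.2.2.2)]
        by_cases hc : ((i:Int) - 180) ^ 2 + ((j:Int) - 90) ^ 2 ≤ 2500
        · rw [if_pos hc, if_pos ⟨by nlinarith [sq_nonneg ((i:Int) - 180)], hc⟩]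
        · rw [if_neg hc, if_neg (show ¬(((j:Int) - 90) ^ 2 ≤ 2500 ∧
            ((i:Int) - 180) ^ 2 + ((j:Int) - 90) ^ 2 ≤ 2500) from fun h => hc h.2)]
          by_cases hr : 30 ≤ (i:Int) ∧ (i:Int) < 120 ∧ 30 ≤ (j:Int) ∧ (j:Int) < 200
          · rw [if_pos hr, if_pos ⟨⟨hr.2.2.1, hr.2.2.2⟩, hr.1, hr.2.1⟩]
          · rw [if_neg hr, if_neg (show ¬((30 ≤ (j:Int) ∧ (j:Int) < 200) ∧ 30 ≤ (i:Int) ∧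
              (i:Int) < 120) from fun h => hr ⟨h.2.1, h.2.2, h.1.1, h.1.2⟩)]

theorem pv_B_char (size : Int) (hs : 1 ≤ size) :
    (generate_test_image_alt size).length = size.toNat ∧
    (∀ k : Nat, ((generate_test_image_alt size).getD k []).length =
      if k < size.toNat then size.toNat else 0) ∧
    (∀ j i : Nat, j < size.toNat → i < size.toNat →
      pvGet2 (generate_test_image_alt size) j i =
        if PySem.Int.mod (j:Int) 16 = 0 then (100, 100, 100) else pvPix (i:Int) (j:Int)) := by
  have hAlt : generate_test_image_alt size = (PySem.List.pyRange 0 size 1).map (fun y =>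
      if PySem.Int.mod y 16 = 0 then List.replicate size.toNat (100, 100, 100)
      else (PySem.List.pyRange 0 size 1).map (fun x => pvPix x y)) := by
    unfold generate_test_image_alt
    have hinner : ∀ y : Int,
        (fun (row : List (Int × Int × Int)) (x : Int) =>
          if PySem.Int.mod x 16 = 0 then row ++ [((100:Int), (100:Int), (100:Int))]
          else if (120 ≤ y ∧ y ≤ 210) ∧ 160 ≤ x ∧ x ≤ 230 ∧ pvInTriangle x y then
            row ++ [(70, 180, 80)]
          else if (y - 90) ^ 2 ≤ 2500 ∧ (x - 180) ^ 2 + (y - 90) ^ 2 ≤ 2500 then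
            row ++ [(60, 120, 220)]
          else if (30 ≤ y ∧ y < 200) ∧ 30 ≤ x ∧ x < 120 then row ++ [(200, 60, 60)]
          else row ++ [(240, 240, 240)]) =
        (fun (row : List (Int × Int × Int)) (x : Int) => row ++ [pvPix x y]) := by
      intro y
      funext row x
      unfold pvPix
      split_ifs <;> rfl
    have hout : (fun (img : pvImg) (y : Int) =>
        if PySem.Int.mod y 16 = 0 then
          img ++ [List.replicate size.toNat (100, 100, 100)]
        else
          let tri_y := 120 ≤ y ∧ y ≤ 210
          let dy2 := (y - 90) ^ 2
          let rect_y := 30 ≤ y ∧ y < 200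
          img ++ [(PySem.List.pyRange 0 size 1).foldl (fun row x =>
            if PySem.Int.mod x 16 = 0 then row ++ [(100, 100, 100)]
            else if tri_y ∧ 160 ≤ x ∧ x ≤ 230 ∧ pvInTriangle x y then row ++ [(70, 180, 80)]
            else if dy2 ≤ 2500 ∧ (x - 180) ^ 2 + dy2 ≤ 2500 then row ++ [(60, 120, 220)]
            else if rect_y ∧ 30 ≤ x ∧ x < 120 then row ++ [(200, 60, 60)]
            else row ++ [(240, 240, 240)]) []]) =
        (fun (img : pvImg) (y : Int) => img ++
          [if PySem.Int.mod y 16 = 0 then List.replicate size.toNat (100, 100, 100)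
           else (PySem.List.pyRange 0 size 1).map (fun x => pvPix x y)]) := by
      funext img y
      by_cases hy : PySem.Int.mod y 16 = 0
      · rw [if_pos hy, if_pos hy]
      · rw [if_neg hy]
        show img ++ [(PySem.List.pyRange 0 size 1).foldl _ []] = _
        rw [if_neg hy, hinner y, PySem.List.foldl_append_singleton_eq_map, List.nil_append]
    rw [hout, PySem.List.foldl_append_singleton_eq_map, List.nil_append]

  rw [hAlt]
  have hrowlen : ∀ y : Int, (if PySem.Int.mod y 16 = 0 then
      List.replicate size.toNat ((100:Int), (100:Int), (100:Int))
      else (PySem.List.pyRange 0 size 1).map (fun x => pvPix x y)).length = size.toNat := by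
    intro y
    by_cases hy : PySem.Int.mod y 16 = 0
    · rw [if_pos hy, List.length_replicate]
    · rw [if_neg hy]
      simp [PySem.List.length_pyRange_one]
  refine ⟨by simp [PySem.List.length_pyRange_one], ?_, ?_⟩
  · intro k
    by_cases hk : k < size.toNat
    · have hk' : k < ((PySem.List.pyRange 0 size 1).map (fun y =>
          if PySem.Int.mod y 16 = 0 then List.replicate size.toNat (100, 100, 100)
          else (PySem.List.pyRange 0 size 1).map (fun x => pvPix x y))).length := by
        simpa [PySem.List.length_pyRange_one] using hk
      rw [List.getD_eq_getElem _ _ hk']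
      simp only [List.getElem_map]
      rw [hrowlen, if_pos hk]
    · rw [List.getD_eq_default _ _ (by simpa [PySem.List.length_pyRange_one] using hk)]
      simp [hk]
  · intro j i hj hi
    unfold pvGet2
    have hj' : j < ((PySem.List.pyRange 0 size 1).map (fun y =>
        if PySem.Int.mod y 16 = 0 then List.replicate size.toNat (100, 100, 100)
        else (PySem.List.pyRange 0 size 1).map (fun x => pvPix x y))).length := by
      simpa [PySem.List.length_pyRange_one] using hj
    rw [List.getD_eq_getElem _ _ hj']
    simp only [List.getElem_map, PySem.List.getElem_pyRange_one, zero_add]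
    by_cases hy : PySem.Int.mod (j:Int) 16 = 0
    · rw [if_pos hy, if_pos hy]
      rw [List.getD_eq_getElem _ _ (show i <
        (List.replicate size.toNat ((100:Int), (100:Int), (100:Int))).length by
          simpa using hi)]
      simp
    · rw [if_neg hy, if_neg hy]
      rw [List.getD_eq_getElem _ _ (show i <
        ((PySem.List.pyRange 0 size 1).map (fun x => pvPix x (j:Int))).length by
          simpa [PySem.List.length_pyRange_one] using hi)]
      simp only [List.getElem_map, PySem.List.getElem_pyRange_one, zero_add]

theorem pv_final (size : Int) (hs : 1 ≤ size) :
    generate_test_image size = generate_test_image_alt size := by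
  obtain ⟨la, ra, ga⟩ := pv_A_char size hs
  obtain ⟨lb, rb, gb⟩ := pv_B_char size hs
  apply List.ext_getElem (by rw [la, lb])
  intro j h1 h2
  have hjN : j < size.toNat := by rwa [la] at h1
  have hrowA : (generate_test_image size)[j].length = size.toNat := by
    rw [← List.getD_eq_getElem _ [] h1, ra j, if_pos hjN]
  have hrowB : (generate_test_image_alt size)[j].length = size.toNat := by
    rw [← List.getD_eq_getElem _ [] h2, rb j, if_pos hjN]
  apply List.ext_getElem (by rw [hrowA, hrowB])
  intro i g1 g2
  have hiN : i < size.toNat := by rwa [hrowA] at g1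
  have eA : (generate_test_image size)[j][i] = pvGet2 (generate_test_image size) j i := by
    unfold pvGet2
    rw [List.getD_eq_getElem _ [] h1, List.getD_eq_getElem _ _ g1]
  have eB : (generate_test_image_alt size)[j][i] = pvGet2 (generate_test_image_alt size) j i := by
    unfold pvGet2
    rw [List.getD_eq_getElem _ [] h2, List.getD_eq_getElem _ _ g2]
  rw [eA, eB, ga j i hjN hiN, gb j i hjN hiN]

-- ===== VERDICT (by name: the statement is the Claim_ definition above) =====
theorem generate_test_image_spec : Claim_equal_generate_test_image := by
  intro size _ hpre
  unfold Spec_generate_test_image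
  exact pv_final size hpre
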